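-- pv_equiv track=rewrite | github.com/Batuzzai/U-Algoritmos | randomcolor/RandomColoringDiv22.py | getCount2
-- ===== SOURCE A (Python) =====
-- import math
--
-- def getCount2(maxR,maxG,maxB,startR,startG,startB,d1,d2):
--     contador = 0
--     for R in range(0,maxR):            #Se genera el espacio de color rojo, n. restringiéndolo
--         if math.fabs(R-startR) <= d2:
--             for G in range(0,maxG):         #Se intersecta el espacio de color azul con el espacio rojo, generando n*n, restrigiéndolo
--                 if math.fabs(G-startG) <= d2:
--                     for B in range(0,maxB):     #Se vuelve a intersectar el espacio de color verde, en el espacio de color azul, generando n*n*n, restringiéndolo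
--                         """En este punto podemos determinar que la
--                             complejidad del ejercicio es
--                             O(n^3)."""
--                         if math.fabs(B-startB) <= d2:
--                             if((math.fabs(R-startR) >= d1 or math.fabs(G-startG) >= d1 or math.fabs(B-startB) >= d1)):
--                                 contador+=1
--
--     return contador
-- ===== SOURCE B (Python) =====
-- def getCount2(maxR, maxG, maxB, startR, startG, startB, d1, d2):
--     # Closed form: per-axis interval counts + inclusion-exclusion.
--     def cnt(m, s, t):
--         # number of x in [0, m) with |x - s| <= t
--         return max(0, min(m - 1, s + t) - max(0, s - t) + 1)
--     t = min(d2, d1 - 1)  # |x-s| <= d2 and |x-s| < d1  <=>  |x-s| <= t  (integers)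
--     within = cnt(maxR, startR, d2) * cnt(maxG, startG, d2) * cnt(maxB, startB, d2)
--     all_close = cnt(maxR, startR, t) * cnt(maxG, startG, t) * cnt(maxB, startB, t)
--     return within - all_close
-- ===== Notes on version B (the rewrite author's own statement) =====
-- stated objective: faster
-- what changed: Replaced the O(n^3) triple loop over the color cube by a closed-form inclusion-exclusion on per-axis interval counts: (triples with all axes within d2) minus (triples with all axes within d2 and strictly below d1).
import Mathlib
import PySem

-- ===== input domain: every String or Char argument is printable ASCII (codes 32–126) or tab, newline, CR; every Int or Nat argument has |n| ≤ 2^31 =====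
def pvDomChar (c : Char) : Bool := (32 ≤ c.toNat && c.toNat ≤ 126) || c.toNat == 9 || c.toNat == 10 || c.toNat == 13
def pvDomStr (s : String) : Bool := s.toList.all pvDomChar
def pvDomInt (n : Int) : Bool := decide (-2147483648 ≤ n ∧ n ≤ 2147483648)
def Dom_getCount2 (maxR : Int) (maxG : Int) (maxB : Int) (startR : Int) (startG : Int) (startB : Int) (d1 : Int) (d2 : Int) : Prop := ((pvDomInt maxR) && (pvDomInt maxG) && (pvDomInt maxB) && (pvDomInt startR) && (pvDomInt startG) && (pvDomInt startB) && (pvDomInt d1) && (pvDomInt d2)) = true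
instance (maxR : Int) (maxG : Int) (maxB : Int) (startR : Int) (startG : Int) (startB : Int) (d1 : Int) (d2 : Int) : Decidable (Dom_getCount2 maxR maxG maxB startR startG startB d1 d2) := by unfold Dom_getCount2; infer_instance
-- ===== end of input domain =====

-- B replaces A's O(maxR·maxG·maxB) triple loop by a closed-form inclusion-exclusion on
-- per-axis interval counts (objective: faster, asymptotic).

-- ===== PORT A =====
def getCount2 (maxR : Int) (maxG : Int) (maxB : Int) (startR : Int) (startG : Int) (startB : Int) (d1 : Int) (d2 : Int) : Int :=
  (PySem.List.pyRange 0 maxR 1).foldl (fun contador R =>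
    if |R - startR| ≤ d2 then
      (PySem.List.pyRange 0 maxG 1).foldl (fun c G =>
        if |G - startG| ≤ d2 then
          (PySem.List.pyRange 0 maxB 1).foldl (fun c2 B =>
            if |B - startB| ≤ d2 then
              if d1 ≤ |R - startR| ∨ d1 ≤ |G - startG| ∨ d1 ≤ |B - startB| then c2 + 1 else c2
            else c2) c
        else c) contador
    else contador) 0

-- ===== PORT B =====
-- number of x in [0, m) with |x - s| ≤ t (Source B's cnt helper)
def pvCnt (m s t : Int) : Int := max 0 (min (m - 1) (s + t) - max 0 (s - t) + 1)

def getCount2_alt (maxR : Int) (maxG : Int) (maxB : Int) (startR : Int) (startG : Int) (startB : Int) (d1 : Int) (d2 : Int) : Int :=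
  let t := min d2 (d1 - 1)
  pvCnt maxR startR d2 * pvCnt maxG startG d2 * pvCnt maxB startB d2
    - pvCnt maxR startR t * pvCnt maxG startG t * pvCnt maxB startB t

-- ===== PRECONDITION & SPEC =====
def Spec_getCount2 (maxR : Int) (maxG : Int) (maxB : Int) (startR : Int) (startG : Int) (startB : Int) (d1 : Int) (d2 : Int) (out : Int) : Prop := out = getCount2_alt maxR maxG maxB startR startG startB d1 d2
instance (maxR : Int) (maxG : Int) (maxB : Int) (startR : Int) (startG : Int) (startB : Int) (d1 : Int) (d2 : Int) (out : Int) : Decidable (Spec_getCount2 maxR maxG maxB startR startG startB d1 d2 out) := by unfold Spec_getCount2; infer_instance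

-- ===== CLAIM (what is proved, stated in full; the proofs are below) =====
def Claim_equal_getCount2 : Prop := ∀ (maxR : Int) (maxG : Int) (maxB : Int) (startR : Int) (startG : Int) (startB : Int) (d1 : Int) (d2 : Int), Dom_getCount2 maxR maxG maxB startR startG startB d1 d2 → Spec_getCount2 maxR maxG maxB startR startG startB d1 d2 (getCount2 maxR maxG maxB startR startG startB d1 d2)

-- ===== LEMMAS AND PROOFS =====

-- a foldl whose step adds a value independent of the accumulator is a sum
theorem pv_foldl_shift {f : Int → Int → Int} {h : Int → Int}
    (hf : ∀ c x, f c x = c + h x) :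
    ∀ (l : List Int) (c : Int), l.foldl f c = c + (l.map h).sum := by
  intro l
  induction l with
  | nil => simp
  | cons x t ih => intro c; simp only [List.foldl_cons, List.map_cons, List.sum_cons, hf, ih]; ring

theorem pv_sum_map_sub (f g : Int → Int) :
    ∀ l : List Int, (l.map (fun x => f x - g x)).sum = (l.map f).sum - (l.map g).sum := by
  intro l
  induction l with
  | nil => simp
  | cons x t ih => simp only [List.map_cons, List.sum_cons, ih]; ring

-- the interval count: number of x ∈ [0,m) with |x - s| ≤ t, as a sum of 0/1 indicators
theorem pv_count_abs_nat (s t : Int) :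
    ∀ n : Nat, ((PySem.List.pyRange 0 n 1).map (fun x => if |x - s| ≤ t then (1:Int) else 0)).sum
      = pvCnt n s t := by
  intro n
  induction n with
  | zero =>
      rw [PySem.List.pyRange_one_eq_nil (by norm_num)]
      simp only [List.map_nil, List.sum_nil, pvCnt]
      omega
  | succ k ih =>
      have hcast : ((k+1 : Nat) : Int) = (k : Int) + 1 := by push_cast; ring
      rw [hcast, PySem.List.pyRange_one_succ_right (by positivity), List.map_append,
          List.sum_append, ih]
      simp only [List.map_cons, List.map_nil, List.sum_cons, List.sum_nil, add_zero]
      have hk : (0:Int) ≤ (k:Int) := by positivity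
      split_ifs with h
      · rw [abs_sub_le_iff] at h; simp only [pvCnt]; omega
      · rw [abs_sub_le_iff, not_and_or, not_le, not_le] at h; simp only [pvCnt]; omega

theorem pv_count_abs (s t : Int) (m : Int) :
    ((PySem.List.pyRange 0 m 1).map (fun x => if |x - s| ≤ t then (1:Int) else 0)).sum
      = pvCnt m s t := by
  by_cases hm : m ≤ 0
  · rw [PySem.List.pyRange_one_eq_nil hm]
    simp only [List.map_nil, List.sum_nil, pvCnt]
    omega
  · have hmn : m = (m.toNat : Int) := by omega
    rw [hmn, pv_count_abs_nat]

-- counting |x-s| ≤ d2 ∧ |x-s| < d1 is the interval count with radius min d2 (d1-1)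
theorem pv_count_close (s d1 d2 m : Int) :
    ((PySem.List.pyRange 0 m 1).map
        (fun x => if |x - s| ≤ d2 ∧ ¬ d1 ≤ |x - s| then (1:Int) else 0)).sum
      = pvCnt m s (min d2 (d1 - 1)) := by
  rw [← pv_count_abs s (min d2 (d1-1)) m]
  apply congrArg
  apply List.map_congr_left
  intro x _
  have h := abs_nonneg (x - s)
  by_cases h1 : |x - s| ≤ d2 ∧ ¬ d1 ≤ |x - s|
  · rw [if_pos h1, if_pos (by omega)]
  · rw [if_neg h1, if_neg (by omega)]

theorem pv_level_const (s t m a : Int) :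
    ((PySem.List.pyRange 0 m 1).map (fun x => if |x - s| ≤ t then a else 0)).sum
      = a * pvCnt m s t := by
  rw [← pv_count_abs s t m, ← List.sum_map_mul_left]
  apply congrArg
  apply List.map_congr_left
  intro x _
  split_ifs <;> ring

-- one coordinate summed out
theorem pv_level (s d1 d2 m a c : Int) :
    ((PySem.List.pyRange 0 m 1).map
        (fun x => if |x - s| ≤ d2 then (if d1 ≤ |x - s| then a else a - c) else 0)).sum
      = a * pvCnt m s d2 - c * pvCnt m s (min d2 (d1 - 1)) := by
  have key : ((PySem.List.pyRange 0 m 1).map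
      (fun x => if |x - s| ≤ d2 then (if d1 ≤ |x - s| then a else a - c) else 0)).sum
      = ((PySem.List.pyRange 0 m 1).map
          (fun x => (a * (if |x - s| ≤ d2 then (1:Int) else 0))
            - (c * (if |x - s| ≤ d2 ∧ ¬ d1 ≤ |x - s| then (1:Int) else 0)))).sum := by
    apply congrArg
    apply List.map_congr_left
    intro x _
    by_cases h2 : |x - s| ≤ d2
    · by_cases h1 : d1 ≤ |x - s|
      · rw [if_pos h2, if_pos h1, if_pos h2, if_neg (by tauto)]; ring
      · rw [if_pos h2, if_neg h1, if_pos h2, if_pos ⟨h2, h1⟩]; ring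
    · rw [if_neg h2, if_neg h2, if_neg (by tauto)]; ring
  rw [key,
      pv_sum_map_sub (fun x => a * (if |x - s| ≤ d2 then (1:Int) else 0))
        (fun x => c * (if |x - s| ≤ d2 ∧ ¬ d1 ≤ |x - s| then (1:Int) else 0)),
      List.sum_map_mul_left, List.sum_map_mul_left, pv_count_abs, pv_count_close]

-- the innermost B-loop summed out, for fixed truth values of the R and G tests
theorem pv_inner_count (sB d1 d2 mB : Int) (pR pG : Prop) [Decidable pR] [Decidable pG] :
    ((PySem.List.pyRange 0 mB 1).map
        (fun B => if |B - sB| ≤ d2 then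
            (if pR ∨ pG ∨ d1 ≤ |B - sB| then (1:Int) else 0) else 0)).sum
      = if pR ∨ pG then pvCnt mB sB d2
        else pvCnt mB sB d2 - pvCnt mB sB (min d2 (d1 - 1)) := by
  by_cases hp : pR ∨ pG
  · rw [if_pos hp, ← pv_count_abs sB d2 mB]
    apply congrArg
    apply List.map_congr_left
    intro x _
    by_cases h2 : |x - sB| ≤ d2
    · rw [if_pos h2, if_pos (by tauto), if_pos h2]
    · rw [if_neg h2, if_neg h2]
  · rw [if_neg hp]
    have key : ((PySem.List.pyRange 0 mB 1).map
        (fun B => if |B - sB| ≤ d2 then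
            (if pR ∨ pG ∨ d1 ≤ |B - sB| then (1:Int) else 0) else 0)).sum
        = ((PySem.List.pyRange 0 mB 1).map
            (fun x => if |x - sB| ≤ d2 then (if d1 ≤ |x - sB| then (1:Int) else 1 - 1) else 0)).sum := by
      apply congrArg
      apply List.map_congr_left
      intro x _
      by_cases h2 : |x - sB| ≤ d2
      · by_cases h1 : d1 ≤ |x - sB|
        · rw [if_pos h2, if_pos (by tauto), if_pos h2, if_pos h1]
        · rw [if_pos h2, if_neg (by tauto), if_pos h2, if_neg h1]; norm_num
      · rw [if_neg h2, if_neg h2]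
    rw [key, pv_level]
    ring

-- ===== VERDICT (by name: the statement is the Claim_ definition above) =====
theorem getCount2_spec : Claim_equal_getCount2 := by
  intro maxR maxG maxB startR startG startB d1 d2 _
  unfold Spec_getCount2 getCount2 getCount2_alt
  have h3 : ∀ (R G c : Int),
      ((PySem.List.pyRange 0 maxB 1).foldl (fun c2 B =>
          if |B - startB| ≤ d2 then
            (if d1 ≤ |R - startR| ∨ d1 ≤ |G - startG| ∨ d1 ≤ |B - startB| then c2 + 1 else c2)
          else c2) c)
        = c + (if d1 ≤ |R - startR| ∨ d1 ≤ |G - startG| then pvCnt maxB startB d2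
               else pvCnt maxB startB d2 - pvCnt maxB startB (min d2 (d1 - 1))) := by
    intro R G c
    have hstep : ∀ (c2 B : Int),
        (if |B - startB| ≤ d2 then
          (if d1 ≤ |R - startR| ∨ d1 ≤ |G - startG| ∨ d1 ≤ |B - startB| then c2 + 1 else c2)
         else c2)
        = c2 + (if |B - startB| ≤ d2 then
            (if d1 ≤ |R - startR| ∨ d1 ≤ |G - startG| ∨ d1 ≤ |B - startB| then (1:Int) else 0)
            else 0) := by
      intro c2 B; split_ifs <;> ring
    rw [pv_foldl_shift hstep]
    rw [pv_inner_count startB d1 d2 maxB (d1 ≤ |R - startR|) (d1 ≤ |G - startG|)]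
  have h2 : ∀ (R c : Int),
      ((PySem.List.pyRange 0 maxG 1).foldl (fun c G =>
          if |G - startG| ≤ d2 then
            ((PySem.List.pyRange 0 maxB 1).foldl (fun c2 B =>
                if |B - startB| ≤ d2 then
                  (if d1 ≤ |R - startR| ∨ d1 ≤ |G - startG| ∨ d1 ≤ |B - startB| then c2 + 1 else c2)
                else c2) c)
          else c) c)
        = c + (if d1 ≤ |R - startR|
               then pvCnt maxG startG d2 * pvCnt maxB startB d2
               else pvCnt maxG startG d2 * pvCnt maxB startB d2
                    - pvCnt maxG startG (min d2 (d1 - 1)) * pvCnt maxB startB (min d2 (d1 - 1))) := by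
    intro R c
    have hstep : ∀ (c G : Int),
        (if |G - startG| ≤ d2 then
            ((PySem.List.pyRange 0 maxB 1).foldl (fun c2 B =>
                if |B - startB| ≤ d2 then
                  (if d1 ≤ |R - startR| ∨ d1 ≤ |G - startG| ∨ d1 ≤ |B - startB| then c2 + 1 else c2)
                else c2) c)
         else c)
        = c + (if |G - startG| ≤ d2 then
            (if d1 ≤ |R - startR| ∨ d1 ≤ |G - startG| then pvCnt maxB startB d2
             else pvCnt maxB startB d2 - pvCnt maxB startB (min d2 (d1 - 1))) else 0) := by
      intro c G
      by_cases hG2 : |G - startG| ≤ d2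
      · rw [if_pos hG2, if_pos hG2, h3]
      · rw [if_neg hG2, if_neg hG2]; ring
    rw [pv_foldl_shift hstep]
    congr 1
    by_cases hR1 : d1 ≤ |R - startR|
    · rw [if_pos hR1]
      have : ((PySem.List.pyRange 0 maxG 1).map (fun G => if |G - startG| ≤ d2 then
          (if d1 ≤ |R - startR| ∨ d1 ≤ |G - startG| then pvCnt maxB startB d2
           else pvCnt maxB startB d2 - pvCnt maxB startB (min d2 (d1 - 1))) else 0)).sum
          = ((PySem.List.pyRange 0 maxG 1).map (fun G => if |G - startG| ≤ d2 then
              pvCnt maxB startB d2 else 0)).sum := by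
        apply congrArg
        apply List.map_congr_left
        intro x _
        by_cases h2 : |x - startG| ≤ d2
        · rw [if_pos h2, if_pos (Or.inl hR1), if_pos h2]
        · rw [if_neg h2, if_neg h2]
      rw [this, pv_level_const]
      ring
    · rw [if_neg hR1]
      have : ((PySem.List.pyRange 0 maxG 1).map (fun G => if |G - startG| ≤ d2 then
          (if d1 ≤ |R - startR| ∨ d1 ≤ |G - startG| then pvCnt maxB startB d2
           else pvCnt maxB startB d2 - pvCnt maxB startB (min d2 (d1 - 1))) else 0)).sum
          = ((PySem.List.pyRange 0 maxG 1).map (fun G => if |G - startG| ≤ d2 then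
              (if d1 ≤ |G - startG| then pvCnt maxB startB d2
               else pvCnt maxB startB d2 - pvCnt maxB startB (min d2 (d1 - 1))) else 0)).sum := by
        apply congrArg
        apply List.map_congr_left
        intro x _
        by_cases h2 : |x - startG| ≤ d2
        · rw [if_pos h2, if_pos h2]
          by_cases h1 : d1 ≤ |x - startG|
          · rw [if_pos (Or.inr h1), if_pos h1]
          · rw [if_neg (by tauto), if_neg h1]
        · rw [if_neg h2, if_neg h2]
      rw [this, pv_level]
      ring
  have hstep : ∀ (c R : Int),
      (if |R - startR| ≤ d2 then
          ((PySem.List.pyRange 0 maxG 1).foldl (fun c G =>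
              if |G - startG| ≤ d2 then
                ((PySem.List.pyRange 0 maxB 1).foldl (fun c2 B =>
                    if |B - startB| ≤ d2 then
                      (if d1 ≤ |R - startR| ∨ d1 ≤ |G - startG| ∨ d1 ≤ |B - startB| then c2 + 1 else c2)
                    else c2) c)
              else c) c)
       else c)
      = c + (if |R - startR| ≤ d2 then
          (if d1 ≤ |R - startR|
           then pvCnt maxG startG d2 * pvCnt maxB startB d2
           else pvCnt maxG startG d2 * pvCnt maxB startB d2
                - pvCnt maxG startG (min d2 (d1 - 1)) * pvCnt maxB startB (min d2 (d1 - 1))) else 0) := by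
    intro c R
    by_cases hR2 : |R - startR| ≤ d2
    · rw [if_pos hR2, if_pos hR2, h2]
    · rw [if_neg hR2, if_neg hR2]; ring
  rw [pv_foldl_shift hstep]
  rw [pv_level]
  ring
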